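-- pv_equiv track=rewrite | github.com/JiHuDad/OCAD | ocad/features/engine.py | _calculate_failure_runlength
-- ===== SOURCE A (Python) =====
-- from typing import Dict, List, Optional, Tuple
--
-- def _calculate_failure_runlength(success_values: List[bool]) -> Optional[int]:
--     """Calculate maximum failure run length.
--
--     Args:
--         success_values: List of success/failure boolean values
--
--     Returns:
--         Maximum consecutive failure count
--     """
--     if not success_values:
--         return None
--
--     max_failures = 0
--     current_failures = 0
--
--     for success in success_values:
--         if not success:
--             current_failures += 1
--             max_failures = max(max_failures, current_failures)
--         else:
--             current_failures = 0
--
--     return max_failures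
-- ===== SOURCE B (Python) =====
-- from itertools import groupby
-- from typing import List, Optional
--
-- def _calculate_failure_runlength(success_values: List[bool]) -> Optional[int]:
--     if not success_values:
--         return None
--     return max((sum(1 for _ in g) for k, g in groupby(success_values) if not k),
--                default=0)
-- ===== Notes on version B (the rewrite author's own statement) =====
-- stated objective: idiomatic
-- what changed: B splits the list into maximal runs with itertools.groupby and takes the max length over the failure runs (default 0), instead of threading a running counter and running max through a flat loop.
import Mathlib
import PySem

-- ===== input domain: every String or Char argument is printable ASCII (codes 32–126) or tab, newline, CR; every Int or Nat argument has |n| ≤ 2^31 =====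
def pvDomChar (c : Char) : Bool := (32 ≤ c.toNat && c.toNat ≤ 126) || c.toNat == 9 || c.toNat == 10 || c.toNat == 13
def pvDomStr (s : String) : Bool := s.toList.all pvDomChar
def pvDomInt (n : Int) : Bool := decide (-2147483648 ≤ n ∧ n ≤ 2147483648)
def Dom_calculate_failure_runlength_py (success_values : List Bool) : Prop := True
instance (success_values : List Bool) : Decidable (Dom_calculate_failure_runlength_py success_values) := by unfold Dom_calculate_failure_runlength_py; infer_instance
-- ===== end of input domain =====

-- B replaces A's flat loop (running counter + running max) by a groupby-style
-- decomposition into maximal runs, taking the max length over the failure runs.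

-- ===== PORT A =====
-- the for-loop over (max_failures, current_failures)
def calculate_failure_runlength_py (success_values : List Bool) : Option Int :=
  if success_values = [] then none
  else
    some ((success_values.foldl
      (fun (st : Int × Int) success =>
        if success = false then (max st.1 (st.2 + 1), st.2 + 1) else (st.1, 0))
      (0, 0)).1)

-- ===== PORT B =====
-- itertools.groupby: the list of maximal runs as (key, run length) pairs
def pyGroupRuns : List Bool → List (Bool × Int)
  | [] => []
  | x :: xs =>
    (x, (xs.takeWhile (fun y => y == x)).length + 1)
      :: pyGroupRuns (xs.dropWhile (fun y => y == x))
termination_by l => l.length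
decreasing_by
  simpa using Nat.lt_succ_of_le (List.length_dropWhile_le _ _)

-- max(lengths of failure runs, default=0)
def calculate_failure_runlength_py_alt (success_values : List Bool) : Option Int :=
  if success_values = [] then none
  else
    some (match (pyGroupRuns success_values).filterMap
            (fun kg => if kg.1 then none else some kg.2) with
          | [] => 0
          | h :: t => t.foldl max h)

-- ===== PRECONDITION & SPEC =====
def Spec_calculate_failure_runlength_py (success_values : List Bool) (out : Option Int) : Prop := out = calculate_failure_runlength_py_alt success_values
instance (success_values : List Bool) (out : Option Int) : Decidable (Spec_calculate_failure_runlength_py success_values out) := by unfold Spec_calculate_failure_runlength_py; infer_instance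

-- ===== CLAIM (what is proved, stated in full; the proofs are below) =====
def Claim_equal_calculate_failure_runlength_py : Prop := ∀ (success_values : List Bool), Dom_calculate_failure_runlength_py success_values → Spec_calculate_failure_runlength_py success_values (calculate_failure_runlength_py success_values)

-- ===== LEMMAS AND PROOFS =====

-- A's loop step
def pvStep (st : Int × Int) (success : Bool) : Int × Int :=
  cond success (st.1, 0) (max st.1 (st.2 + 1), st.2 + 1)

-- B's failure-run lengths
def pvLens (xs : List Bool) : List Int :=
  (pyGroupRuns xs).filterMap (fun kg => if kg.1 then none else some kg.2)

lemma pvLens_true (xs : List Bool) :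
    pvLens (true :: xs) = pvLens (xs.dropWhile (fun y => y == true)) := by
  unfold pvLens
  rw [pyGroupRuns]
  simp

lemma pvLens_false (xs : List Bool) :
    pvLens (false :: xs)
      = ((xs.takeWhile (fun y => y == false)).length + 1 : Int)
        :: pvLens (xs.dropWhile (fun y => y == false)) := by
  unfold pvLens
  rw [pyGroupRuns]
  simp

lemma pvLens_pos (xs : List Bool) : ∀ e ∈ pvLens xs, 1 ≤ e := by
  match xs with
  | [] => intro e he; simp [pvLens, pyGroupRuns] at he
  | true :: xs =>
    rw [pvLens_true]
    exact pvLens_pos _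
  | false :: xs =>
    rw [pvLens_false]
    intro e he
    rcases List.mem_cons.1 he with h | h
    · have : (0 : Int) ≤ (xs.takeWhile (fun y => y == false)).length := by positivity
      omega
    · exact pvLens_pos _ e h
termination_by xs.length
decreasing_by
  · simpa using Nat.lt_succ_of_le (List.length_dropWhile_le _ _)
  · simpa using Nat.lt_succ_of_le (List.length_dropWhile_le _ _)

-- dropping a leading run of trues does not change the failure-run lengths
lemma pvLens_dropTrue (l : List Bool) :
    pvLens (List.dropWhile (fun y => y == true) l) = pvLens l := by
  induction l with
  | nil => rfl
  | cons x l ih =>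
    cases x with
    | true =>
      rw [List.dropWhile_cons_of_pos (by simp), ih, pvLens_true]
      exact (ih ▸ rfl)
    | false => rw [List.dropWhile_cons_of_neg (by simp)]

-- A's loop over a run of falses, under the invariant c ≤ m
lemma pvFoldl_falses (l : List Bool) (h : ∀ y ∈ l, y = false) :
    ∀ m c : Int, c ≤ m →
      l.foldl pvStep (m, c) = (max m (c + l.length), c + l.length) := by
  induction l with
  | nil => intro m c hc; simp; omega
  | cons y l ih =>
    intro m c hc
    have hy : y = false := h y (by simp)
    subst hy
    have hrec := ih (fun z hz => h z (by simp [hz])) (max m (c + 1)) (c + 1) (by omega)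
    simp only [List.foldl_cons, pvStep, cond_false]
    rw [hrec]
    have hlen : ((false :: l).length : Int) = (l.length : Int) + 1 := by
      simp only [List.length_cons]; push_cast; ring
    rw [hlen, Prod.mk.injEq]
    exact ⟨by omega, by omega⟩

lemma pvLens_nil : pvLens [] = [] := by
  unfold pvLens
  rw [pyGroupRuns]
  rfl

-- the first element surviving dropWhile (== false) is true
lemma pvDropHead (xs : List Bool) (y : Bool) (r' : List Bool)
    (h : List.dropWhile (fun z => z == false) xs = y :: r') : y = true := by
  induction xs with
  | nil => simp at h
  | cons a xs ih =>
    cases a with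
    | false =>
      rw [List.dropWhile_cons_of_pos (by simp)] at h
      exact ih h
    | true =>
      rw [List.dropWhile_cons_of_neg (by simp)] at h
      injection h with h1 _
      exact h1.symm

-- main invariant: A's loop from (m, 0) computes the max of m and B's run lengths
lemma pvMain (xs : List Bool) :
    ∀ m : Int, (xs.foldl pvStep (m, 0)).1 = (pvLens xs).foldl max m := by
  match xs with
  | [] => intro m; simp [pvLens, pyGroupRuns]
  | true :: xs =>
    intro m
    have h1 : (true :: xs).foldl pvStep (m, 0) = xs.foldl pvStep (m, 0) := by
      simp [pvStep]
    rw [h1, pvLens_true, pvLens_dropTrue]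
    exact pvMain xs m
  | false :: xs =>
    intro m
    have hgf : ∀ y ∈ xs.takeWhile (fun y => y == false), y = false := by
      intro y hy
      simpa using List.mem_takeWhile_imp hy
    have hfold := pvFoldl_falses _ hgf (max m 1) 1 (by omega)
    have h1 : (false :: xs).foldl pvStep (m, 0)
        = (xs.dropWhile (fun y => y == false)).foldl pvStep
            (max m (1 + ((xs.takeWhile (fun y => y == false)).length : Int)),
             1 + ((xs.takeWhile (fun y => y == false)).length : Int)) := by
      conv_lhs => rw [show (false :: xs) = false ::
        (xs.takeWhile (fun y => y == false) ++ xs.dropWhile (fun y => y == false)) from by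
          rw [List.takeWhile_append_dropWhile]]
      rw [List.foldl_cons, List.foldl_append]
      show (xs.dropWhile (fun y => y == false)).foldl pvStep
          ((xs.takeWhile (fun y => y == false)).foldl pvStep (max m 1, 1)) = _
      rw [hfold]
      congr 1
      rw [Prod.mk.injEq]
      exact ⟨by omega, rfl⟩
    rw [h1, pvLens_false]
    cases hr : xs.dropWhile (fun y => y == false) with
    | nil =>
      simp only [List.foldl_nil, List.foldl_cons, pvLens_nil]
      omega
    | cons y r' =>
      have hy : y = true := pvDropHead xs y r' hr
      subst hy
      have hlen : r'.length < (false :: xs).length := by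
        have h2 : (xs.dropWhile (fun y => y == false)).length ≤ xs.length :=
          List.length_dropWhile_le _ _
        rw [hr] at h2
        simp only [List.length_cons] at h2 ⊢
        omega
      have hstep : (true :: r').foldl pvStep
            (max m (1 + ((xs.takeWhile (fun y => y == false)).length : Int)),
             1 + ((xs.takeWhile (fun y => y == false)).length : Int))
          = r'.foldl pvStep
            (max m (1 + ((xs.takeWhile (fun y => y == false)).length : Int)), 0) := by
        simp [pvStep]
      rw [hstep, pvMain r', pvLens_true, pvLens_dropTrue, List.foldl_cons]
      congr 1
      omega
termination_by xs.length
decreasing_by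
  · simp
  · simp only [List.length_cons] at hlen ⊢; omega

-- ===== VERDICT (by name: the statement is the Claim_ definition above) =====
theorem calculate_failure_runlength_py_spec : Claim_equal_calculate_failure_runlength_py := by
  intro xs _
  unfold Spec_calculate_failure_runlength_py calculate_failure_runlength_py calculate_failure_runlength_py_alt
  by_cases hxs : xs = []
  · simp [hxs]
  · rw [if_neg hxs, if_neg hxs]
    have hfun : (fun (st : Int × Int) success =>
        if success = false then (max st.1 (st.2 + 1), st.2 + 1) else (st.1, 0)) = pvStep := by
      funext st s; cases s <;> simp [pvStep]
    rw [hfun, show (fun (kg : Bool × Int) => if kg.1 then none else some kg.2)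
          = (fun (kg : Bool × Int) => if kg.1 then (none : Option Int) else some kg.2) from rfl]
    have hA := pvMain xs 0
    rw [hA]
    have hpos := pvLens_pos xs
    cases hl : pvLens xs with
    | nil =>
      rw [show (pyGroupRuns xs).filterMap (fun kg => if kg.1 then none else some kg.2) = pvLens xs from rfl, hl]
      rfl
    | cons h t =>
      rw [show (pyGroupRuns xs).filterMap (fun kg => if kg.1 then none else some kg.2) = pvLens xs from rfl, hl]
      simp only [List.foldl_cons]
      congr 2
      have := hpos h (by rw [hl]; simp)
      omega
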